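-- pv_equiv track=rewrite | github.com/MUICT-SERU/SP2023-Greeedhub | PythonFiles_keep/pyspv/70345764/72d1c2f09ec0d493f4121c1b31bf72b6da76da84/72d1c2f09ec0d493f4121c1b31bf72b6da76da84_pyspv_70345764_20140218_000503_after_7.py | target_to_bits
-- ===== SOURCE A (Python) =====
-- def target_to_bits(target):
--     v = []
--     while target != 0:
--         v.append(target % 256)
--         target //= 256
--
--     if v[-1] > 0x7f:
--         v.append(0)
--
--     m = len(v)
--     while len(v) < 3:
--         v = [0] + v
--
--     return (m << 24) | (v[-1] << 16) | (v[-2] << 8) | v[-3]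
-- ===== SOURCE B (Python) =====
-- def target_to_bits(target):
--     nbytes = (target.bit_length() + 7) // 8
--     b = target.to_bytes(nbytes, 'big')
--     if b and b[0] > 0x7f:
--         b = b'\x00' + b
--     size = len(b)
--     b = b + b'\x00' * (3 - len(b))
--     return (size << 24) | (b[0] << 16) | (b[1] << 8) | b[2]
-- ===== Notes on version B (the rewrite author's own statement) =====
-- stated objective: idiomatic
-- what changed: B replaces A's little-endian digit-extraction loop plus front-padding loop with a direct big-endian byte string from bit_length()/to_bytes, an optional sign-byte prepend, right-padding, and reading the top three bytes by index.
-- outside the precondition, e.g. on target_to_bits(0): A raises IndexError, B returns 0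
import Mathlib
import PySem

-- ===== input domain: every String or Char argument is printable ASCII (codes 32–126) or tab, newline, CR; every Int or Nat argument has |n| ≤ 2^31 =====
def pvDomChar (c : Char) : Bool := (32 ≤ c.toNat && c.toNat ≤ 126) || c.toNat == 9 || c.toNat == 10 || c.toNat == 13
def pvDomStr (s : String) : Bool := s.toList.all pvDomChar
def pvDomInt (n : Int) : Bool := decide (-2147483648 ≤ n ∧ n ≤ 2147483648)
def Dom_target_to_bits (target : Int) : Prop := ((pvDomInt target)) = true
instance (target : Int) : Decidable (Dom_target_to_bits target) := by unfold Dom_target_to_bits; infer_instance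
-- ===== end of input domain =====

-- B replaces A's digit-extraction loop + front-padding loop by direct big-endian byte computation
-- (bit_length-based length, optional sign byte, right-pad, index the top three bytes); idiomatic, same cost.

-- ===== PORT A =====
-- while target != 0: v.append(target % 256); target //= 256   (fuel-bounded; Pre_ keeps target positive, ≤ 2^31 by Dom, so 64 steps suffice)
def pvDigitsA : Nat → Int → List Int → List Int
  | 0, _, v => v
  | f + 1, target, v =>
    if target ≠ 0 then pvDigitsA f (PySem.Int.floordiv target 256) (v ++ [PySem.Int.mod target 256])
    else v

-- while len(v) < 3: v = [0] + v
def pvPad3 (v : List Int) : List Int :=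
  if v.length < 3 then pvPad3 (0 :: v) else v
termination_by 3 - v.length

def target_to_bits (target : Int) : Int :=
  let v := pvDigitsA 64 target []
  let v := if (PySem.List.pyGet? v (-1)).getD 0 > 0x7f then v ++ [0] else v
  let m : Int := v.length
  let v := pvPad3 v
  PySem.Int.bor (m <<< 24)
    (PySem.Int.bor (((PySem.List.pyGet? v (-1)).getD 0) <<< 16)
      (PySem.Int.bor (((PySem.List.pyGet? v (-2)).getD 0) <<< 8)
        ((PySem.List.pyGet? v (-3)).getD 0)))

-- ===== PORT B =====
-- target.to_bytes(n, 'big') as a list of byte values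
def pvToBytesBE : Nat → Int → List Int
  | 0, _ => []
  | k + 1, x => pvToBytesBE k (PySem.Int.floordiv x 256) ++ [PySem.Int.mod x 256]

def target_to_bits_alt (target : Int) : Int :=
  let nbytes := (PySem.Int.bitLength target + 7) / 8
  let b := pvToBytesBE nbytes target
  let b := if b ≠ [] ∧ b.headD 0 > 0x7f then 0 :: b else b
  let size : Int := b.length
  let b := b ++ List.replicate (3 - b.length) 0
  PySem.Int.bor (size <<< 24)
    (PySem.Int.bor ((b.getD 0 0) <<< 16)
      (PySem.Int.bor ((b.getD 1 0) <<< 8) (b.getD 2 0)))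

-- ===== PRECONDITION & SPEC =====
-- Pre_ excludes target ≤ 0: at target = 0 the Python A raises IndexError (v[-1] on []), and for
-- negative target A's while-loop never terminates; A returns a value exactly on positive targets.
def Pre_target_to_bits (target : Int) : Prop := 0 < target
instance (target : Int) : Decidable (Pre_target_to_bits target) := by unfold Pre_target_to_bits; infer_instance
def pvWitness_target_to_bits : Int := (1000)

def Spec_target_to_bits (target : Int) (out : Int) : Prop := out = target_to_bits_alt target
instance (target : Int) (out : Int) : Decidable (Spec_target_to_bits target out) := by unfold Spec_target_to_bits; infer_instance

-- ===== CLAIM (what is proved, stated in full; the proofs are below) =====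
def Claim_equal_target_to_bits : Prop := ∀ (target : Int), Dom_target_to_bits target → Pre_target_to_bits target → Spec_target_to_bits target (target_to_bits target)

-- ===== LEMMAS AND PROOFS =====

theorem pv_bl_range (t : Int) (k : Nat) (h1 : 2 ^ (8 * k - 8) ≤ t.natAbs) (h2 : t.natAbs < 2 ^ (8 * k)) :
    (PySem.Int.bitLength t + 7) / 8 = k := by
  have ht : t ≠ 0 := by
    intro h; subst h; simp at h1
  have ha := PySem.Int.lt_two_pow_bitLength t
  have hb := PySem.Int.two_pow_bitLength_le t ht
  have l1 : 8 * k - 8 < PySem.Int.bitLength t :=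
    (Nat.pow_lt_pow_iff_right (by norm_num)).1 (lt_of_le_of_lt h1 ha)
  have l2 : PySem.Int.bitLength t - 1 < 8 * k :=
    (Nat.pow_lt_pow_iff_right (by norm_num)).1 (lt_of_le_of_lt hb h2)
  omega

theorem pv_main (t : Int) (hd : Dom_target_to_bits t) (hp : Pre_target_to_bits t) :
    target_to_bits t = target_to_bits_alt t := by
  unfold Dom_target_to_bits pvDomInt at hd
  unfold Pre_target_to_bits at hp
  have hub : t ≤ 2147483648 := by simp at hd; omega
  have hne : t ≠ 0 := by omega
  by_cases c1 : t < 256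
  · have hnb : (PySem.Int.bitLength t + 7) / 8 = 1 := pv_bl_range t 1 (by omega) (by omega)
    have e1 : t / 256 = 0 := by omega
    by_cases htop : 127 < t % 256
    · simp [target_to_bits, target_to_bits_alt, pvDigitsA, pvToBytesBE, pvPad3, hnb,
        e1, hne, htop, PySem.List.pyGet?, PySem.List.pyIdx?, List.getD]
    · simp [target_to_bits, target_to_bits_alt, pvDigitsA, pvToBytesBE, pvPad3, hnb,
        e1, hne, htop, PySem.List.pyGet?, PySem.List.pyIdx?, List.getD]
  · by_cases c2 : t < 65536
    · have hnb : (PySem.Int.bitLength t + 7) / 8 = 2 := pv_bl_range t 2 (by omega) (by omega)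
      have e1 : t / 256 ≠ 0 := by omega
      have e2 : t / 256 / 256 = 0 := by omega
      by_cases htop : 127 < t / 256 % 256
      · simp [target_to_bits, target_to_bits_alt, pvDigitsA, pvToBytesBE, pvPad3, hnb,
          e1, e2, hne, htop, PySem.List.pyGet?, PySem.List.pyIdx?, List.getD]
      · simp [target_to_bits, target_to_bits_alt, pvDigitsA, pvToBytesBE, pvPad3, hnb,
          e1, e2, hne, htop, PySem.List.pyGet?, PySem.List.pyIdx?, List.getD]
    · by_cases c3 : t < 16777216
      · have hnb : (PySem.Int.bitLength t + 7) / 8 = 3 := pv_bl_range t 3 (by omega) (by omega)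
        have e1 : t / 256 ≠ 0 := by omega
        have e2 : t / 256 / 256 ≠ 0 := by omega
        have e3 : t / 256 / 256 / 256 = 0 := by omega
        by_cases htop : 127 < t / 256 / 256 % 256
        · simp [target_to_bits, target_to_bits_alt, pvDigitsA, pvToBytesBE, pvPad3, hnb,
            e1, e2, e3, hne, htop, PySem.List.pyGet?, PySem.List.pyIdx?, List.getD]
        · simp [target_to_bits, target_to_bits_alt, pvDigitsA, pvToBytesBE, pvPad3, hnb,
            e1, e2, e3, hne, htop, PySem.List.pyGet?, PySem.List.pyIdx?, List.getD]
      · have hnb : (PySem.Int.bitLength t + 7) / 8 = 4 := pv_bl_range t 4 (by omega) (by omega)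
        have e1 : t / 256 ≠ 0 := by omega
        have e2 : t / 256 / 256 ≠ 0 := by omega
        have e3 : t / 256 / 256 / 256 ≠ 0 := by omega
        have e4 : t / 256 / 256 / 256 / 256 = 0 := by omega
        by_cases htop : 127 < t / 256 / 256 / 256 % 256
        · simp [target_to_bits, target_to_bits_alt, pvDigitsA, pvToBytesBE, pvPad3, hnb,
            e1, e2, e3, e4, hne, htop, PySem.List.pyGet?, PySem.List.pyIdx?, List.getD]
        · simp [target_to_bits, target_to_bits_alt, pvDigitsA, pvToBytesBE, pvPad3, hnb,
            e1, e2, e3, e4, hne, htop, PySem.List.pyGet?, PySem.List.pyIdx?, List.getD]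

-- ===== VERDICT (by name: the statement is the Claim_ definition above) =====
theorem target_to_bits_spec : Claim_equal_target_to_bits := by
  intro t hd hp; exact pv_main t hd hp
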